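-- pv_equiv track=rewrite | github.com/AadiVasa1/CS313E-A4 | recursion.py | split_odd_10_helper
-- ===== SOURCE A (Python) =====
-- def split_odd_10_helper(nums, sum_1 = 0, sum_2 = 0):
--     """
--     recursive helper function for above split_odd_10"""
--     if len(nums)==0 and ((sum_1 % 10 == 0 and sum_2 % 2 == 1)
--                          or (sum_2 % 10 == 0 and sum_1 % 2 == 1)):
--         return True
--     if len(nums)==0:
--         return False
--     add = nums.pop()
--     attempt1 = split_odd_10_helper(nums.copy(),sum_1+add,sum_2)
--     attempt2 = split_odd_10_helper(nums.copy(),sum_1,sum_2+add)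
--     return attempt1 or attempt2
-- ===== SOURCE B (Python) =====
-- def split_odd_10_helper(nums, sum_1=0, sum_2=0):
--     # DP over residues mod 10 of achievable "side-1" subset sums; O(n) instead of O(2^n).
--     # (A mutates its argument by popping the last element; B leaves nums untouched --
--     # the equivalence claimed is about the return value only.)
--     total = sum(nums)
--     if (sum_1 + sum_2 + total) % 2 != 1:
--         return False
--     reach = {0}
--     for x in nums:
--         reach = reach | {(r + x) % 10 for r in reach}
--     return any((sum_1 + r) % 10 == 0 or (sum_2 + total - r) % 10 == 0 for r in reach)
-- ===== Notes on version B (the rewrite author's own statement) =====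
-- stated objective: faster
-- what changed: Replaced the exponential try-both-sides recursion by a single pass that checks the total's parity and runs a mod-10 subset-sum DP over at most 10 residues.
import Mathlib
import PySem

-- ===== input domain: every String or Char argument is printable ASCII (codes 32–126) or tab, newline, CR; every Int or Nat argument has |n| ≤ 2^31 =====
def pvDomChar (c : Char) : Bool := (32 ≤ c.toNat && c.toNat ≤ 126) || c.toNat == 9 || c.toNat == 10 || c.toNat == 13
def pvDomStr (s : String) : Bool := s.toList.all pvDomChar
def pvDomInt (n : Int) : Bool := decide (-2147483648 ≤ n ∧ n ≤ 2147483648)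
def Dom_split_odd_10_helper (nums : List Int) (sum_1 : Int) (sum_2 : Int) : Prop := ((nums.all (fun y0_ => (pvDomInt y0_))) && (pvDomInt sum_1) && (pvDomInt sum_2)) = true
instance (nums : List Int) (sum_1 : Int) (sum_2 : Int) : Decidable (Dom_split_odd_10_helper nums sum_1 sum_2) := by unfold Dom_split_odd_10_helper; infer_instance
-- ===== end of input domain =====

-- B replaces A's O(2^n) try-both-sides recursion by a parity check plus a mod-10 subset-sum
-- residue DP (objective: faster, asymptotic). A pops the last element of its argument list
-- (a caller-visible mutation); B does not mutate — the equivalence is about the return value.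

-- ===== PORT A =====
def split_odd_10_helper (nums : List Int) (sum_1 : Int) (sum_2 : Int) : Bool :=
  if h : nums = [] then
    -- first Python `if`: len == 0 and condition → True; second: len == 0 → False
    ((PySem.Int.mod sum_1 10 == 0 && PySem.Int.mod sum_2 2 == 1) ||
     (PySem.Int.mod sum_2 10 == 0 && PySem.Int.mod sum_1 2 == 1))
  else
    let add := nums.getLast h          -- add = nums.pop()
    let rest := nums.dropLast
    let attempt1 := split_odd_10_helper rest (sum_1 + add) sum_2
    let attempt2 := split_odd_10_helper rest sum_1 (sum_2 + add)
    attempt1 || attempt2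
termination_by nums.length
decreasing_by all_goals
  simp only [List.length_dropLast]
  exact Nat.sub_lt (List.length_pos_iff.mpr h) one_pos

-- ===== PORT B =====
def split_odd_10_helper_alt (nums : List Int) (sum_1 : Int) (sum_2 : Int) : Bool :=
  let total := nums.sum
  if PySem.Int.mod (sum_1 + sum_2 + total) 2 ≠ 1 then false
  else
    let reach :=
      nums.foldl
        (fun acc x =>
          PySem.Set.union acc
            (PySem.Set.ofList (acc.map (fun r => PySem.Int.mod (r + x) 10))))
        (PySem.Set.ofList [0])
    reach.any (fun r =>
      PySem.Int.mod (sum_1 + r) 10 == 0 || PySem.Int.mod (sum_2 + total - r) 10 == 0)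

-- ===== PRECONDITION & SPEC =====
def Spec_split_odd_10_helper (nums : List Int) (sum_1 : Int) (sum_2 : Int) (out : Bool) : Prop := out = split_odd_10_helper_alt nums sum_1 sum_2
instance (nums : List Int) (sum_1 : Int) (sum_2 : Int) (out : Bool) : Decidable (Spec_split_odd_10_helper nums sum_1 sum_2 out) := by unfold Spec_split_odd_10_helper; infer_instance

-- ===== CLAIM (what is proved, stated in full; the proofs are below) =====
def Claim_equal_split_odd_10_helper : Prop := ∀ (nums : List Int) (sum_1 : Int) (sum_2 : Int), Dom_split_odd_10_helper nums sum_1 sum_2 → Spec_split_odd_10_helper nums sum_1 sum_2 (split_odd_10_helper nums sum_1 sum_2)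

-- ===== LEMMAS AND PROOFS =====

-- the closing condition of A, with Python mod turned into emod (divisors 10 and 2 are positive)
def pvCnd (a b : Int) : Prop := (a % 10 = 0 ∧ b % 2 = 1) ∨ (b % 10 = 0 ∧ a % 2 = 1)

-- all subset sums of l (each element goes to side 1 or not)
def pvSubsums : List Int → List Int
  | [] => [0]
  | x :: xs => (pvSubsums xs).map (· + x) ++ pvSubsums xs

-- A's recursion, restated from the FRONT of the list
def pvP : List Int → Int → Int → Bool
  | [], s1, s2 =>
      ((PySem.Int.mod s1 10 == 0 && PySem.Int.mod s2 2 == 1) ||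
       (PySem.Int.mod s2 10 == 0 && PySem.Int.mod s1 2 == 1))
  | x :: xs, s1, s2 => pvP xs (s1 + x) s2 || pvP xs s1 (s2 + x)

theorem pvCnd_ext {a a' b b' : Int} (h1 : a = a') (h2 : b = b') :
    pvCnd a b → pvCnd a' b' := by subst h1; subst h2; exact id

theorem pv_mod10 (a : Int) : PySem.Int.mod a 10 = a % 10 :=
  PySem.Int.mod_eq_emod_of_pos (by norm_num)

theorem pv_mod2 (a : Int) : PySem.Int.mod a 2 = a % 2 :=
  PySem.Int.mod_eq_emod_of_pos (by norm_num)

theorem pvA_append (l : List Int) (x s1 s2 : Int) :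
    split_odd_10_helper (l ++ [x]) s1 s2 =
      (split_odd_10_helper l (s1 + x) s2 || split_odd_10_helper l s1 (s2 + x)) := by
  rw [split_odd_10_helper]
  simp

theorem pvA_eq_P_reverse (l : List Int) : ∀ s1 s2,
    split_odd_10_helper l s1 s2 = pvP l.reverse s1 s2 := by
  induction l using List.reverseRecOn with
  | nil => intro s1 s2; rw [split_odd_10_helper]; rfl
  | append_singleton l x ih =>
      intro s1 s2
      rw [pvA_append, List.reverse_append]
      simp only [List.reverse_cons, List.reverse_nil, List.nil_append, List.cons_append,
        List.nil_append, pvP, ih]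

theorem pv_cnd_iff (a b : Int) :
    (((PySem.Int.mod a 10 == 0 && PySem.Int.mod b 2 == 1) ||
      (PySem.Int.mod b 10 == 0 && PySem.Int.mod a 2 == 1)) = true) ↔ pvCnd a b := by
  simp [pvCnd]

theorem pvP_iff (l : List Int) : ∀ s1 s2,
    pvP l s1 s2 = true ↔ ∃ t ∈ pvSubsums l, pvCnd (s1 + t) (s2 + (l.sum - t)) := by
  induction l with
  | nil =>
      intro s1 s2
      simp only [pvP, pvSubsums, List.mem_singleton, List.sum_nil]
      rw [pv_cnd_iff]
      constructor
      · intro h; exact ⟨0, rfl, by simpa using h⟩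
      · rintro ⟨t, rfl, h⟩; simpa using h
  | cons x xs ih =>
      intro s1 s2
      simp only [pvP, Bool.or_eq_true, ih, pvSubsums, List.mem_append, List.mem_map,
        List.sum_cons]
      constructor
      · rintro (⟨t, ht, hc⟩ | ⟨t, ht, hc⟩)
        · exact ⟨t + x, Or.inl ⟨t, ht, rfl⟩, pvCnd_ext (by ring) (by ring) hc⟩
        · exact ⟨t, Or.inr ht, pvCnd_ext (by ring) (by ring) hc⟩
      · rintro ⟨t, (⟨t', ht', rfl⟩ | ht), hc⟩
        · exact Or.inl ⟨t', ht', pvCnd_ext (by ring) (by ring) hc⟩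
        · exact Or.inr ⟨t, ht, pvCnd_ext (by ring) (by ring) hc⟩

theorem pv_mem_subsums (l : List Int) (t : Int) :
    t ∈ pvSubsums l ↔ ∃ u : List Int, u.Sublist l ∧ u.sum = t := by
  induction l generalizing t with
  | nil =>
      simp only [pvSubsums, List.mem_singleton, List.sublist_nil]
      constructor
      · rintro rfl; exact ⟨[], rfl, rfl⟩
      · rintro ⟨u, rfl, rfl⟩; rfl
  | cons x xs ih =>
      simp only [pvSubsums, List.mem_append, List.mem_map, ih]
      constructor
      · rintro (⟨t', ⟨u, hu, rfl⟩, rfl⟩ | ⟨u, hu, rfl⟩)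
        · exact ⟨x :: u, List.cons_sublist_cons.mpr hu, by simp [add_comm]⟩
        · exact ⟨u, hu.cons x, rfl⟩
      · rintro ⟨u, hu, rfl⟩
        rcases List.sublist_cons_iff.mp hu with h | ⟨r, rfl, hr⟩
        · exact Or.inr ⟨u, h, rfl⟩
        · exact Or.inl ⟨r.sum, ⟨r, hr, rfl⟩, by simp [add_comm]⟩

theorem pv_mem_subsums_reverse (l : List Int) (t : Int) :
    t ∈ pvSubsums l.reverse ↔ t ∈ pvSubsums l := by
  rw [pv_mem_subsums, pv_mem_subsums]
  constructor
  · rintro ⟨u, hu, rfl⟩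
    exact ⟨u.reverse, by simpa using hu.reverse, List.sum_reverse u⟩
  · rintro ⟨u, hu, rfl⟩
    exact ⟨u.reverse, hu.reverse, List.sum_reverse u⟩

-- membership in B's residue-set fold (stated after PySem.Int.mod has been rewritten to %)
theorem pv_mem_reach (l : List Int) : ∀ (acc : List Int), (∀ a ∈ acc, a % 10 = a) →
    ∀ r : Int,
    (r ∈ l.foldl
        (fun acc x =>
          PySem.Set.union acc
            (PySem.Set.ofList (acc.map (fun s => (s + x) % 10)))) acc)
      ↔ ∃ a ∈ acc, ∃ t ∈ pvSubsums l, r = (a + t) % 10 := by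
  induction l with
  | nil =>
      intro acc hacc r
      simp only [List.foldl_nil, pvSubsums, List.mem_singleton]
      constructor
      · intro h; exact ⟨r, h, 0, rfl, by rw [add_zero, hacc r h]⟩
      · rintro ⟨a, ha, t, rfl, rfl⟩; rw [add_zero, hacc a ha]; exact ha
  | cons x xs ih =>
      intro acc hacc r
      simp only [List.foldl_cons]
      rw [ih _ (by
        intro a ha
        rcases (PySem.Set.mem_union _ _ _).mp ha with h | h
        · exact hacc a h
        · rcases List.mem_map.mp ((PySem.Set.mem_ofList _ _).mp h) with ⟨s, _, rfl⟩
          omega)]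
      constructor
      · rintro ⟨a, ha, t, ht, rfl⟩
        rcases (PySem.Set.mem_union _ _ _).mp ha with h | h
        · exact ⟨a, h, t, by simp [pvSubsums, ht], rfl⟩
        · rcases List.mem_map.mp ((PySem.Set.mem_ofList _ _).mp h) with ⟨s, hs, rfl⟩
          refine ⟨s, hs, t + x, ?_, by omega⟩
          simp only [pvSubsums, List.mem_append, List.mem_map]
          exact Or.inl ⟨t, ht, rfl⟩
      · rintro ⟨a, ha, t, ht, rfl⟩
        simp only [pvSubsums, List.mem_append, List.mem_map] at ht
        rcases ht with ⟨t', ht', rfl⟩ | ht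
        · refine ⟨(a + x) % 10,
            (PySem.Set.mem_union _ _ _).mpr (Or.inr ((PySem.Set.mem_ofList _ _).mpr
              (List.mem_map.mpr ⟨a, ha, rfl⟩))), t', ht', by omega⟩
        · exact ⟨a, (PySem.Set.mem_union _ _ _).mpr (Or.inl ha), t, ht, rfl⟩

theorem pvB_iff (l : List Int) (s1 s2 : Int) :
    split_odd_10_helper_alt l s1 s2 = true ↔
      ((s1 + s2 + l.sum) % 2 = 1 ∧
       ∃ t ∈ pvSubsums l, ((s1 + t) % 10 = 0 ∨ (s2 + (l.sum - t)) % 10 = 0)) := by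
  unfold split_odd_10_helper_alt
  simp only [pv_mod2, pv_mod10, ne_eq]
  by_cases hp : (s1 + s2 + l.sum) % 2 = 1
  · rw [if_neg (by simp [hp])]
    simp only [hp, true_and, List.any_eq_true, Bool.or_eq_true, beq_iff_eq]
    have hinv : ∀ a ∈ ([0] : List Int), a % 10 = a := by intro a ha; simp at ha; omega
    constructor
    · rintro ⟨r, hr, hc⟩
      rcases (pv_mem_reach l [0] hinv r).mp hr with ⟨a, ha, t, ht, rfl⟩
      simp only [List.mem_singleton] at ha; subst ha
      refine ⟨t, ht, ?_⟩
      rcases hc with hc | hc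
      · left; omega
      · right; omega
    · rintro ⟨t, ht, hc⟩
      refine ⟨(0 + t) % 10,
        (pv_mem_reach l [0] hinv _).mpr ⟨0, by simp, t, ht, rfl⟩, ?_⟩
      rcases hc with hc | hc
      · left; omega
      · right; omega
  · rw [if_pos (by simpa using hp)]
    simp [hp]

theorem pv_main (l : List Int) (s1 s2 : Int) :
    split_odd_10_helper l s1 s2 = split_odd_10_helper_alt l s1 s2 := by
  rw [Bool.eq_iff_iff, pvA_eq_P_reverse, pvP_iff, pvB_iff]
  simp only [pv_mem_subsums_reverse, List.sum_reverse]
  constructor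
  · rintro ⟨t, ht, hc⟩
    rcases hc with ⟨h10, h2⟩ | ⟨h10, h2⟩
    · exact ⟨by omega, t, ht, Or.inl h10⟩
    · exact ⟨by omega, t, ht, Or.inr h10⟩
  · rintro ⟨hp, t, ht, hc⟩
    refine ⟨t, ht, ?_⟩
    rcases hc with h10 | h10
    · exact Or.inl ⟨h10, by omega⟩
    · exact Or.inr ⟨h10, by omega⟩

-- ===== VERDICT (by name: the statement is the Claim_ definition above) =====
theorem split_odd_10_helper_spec : Claim_equal_split_odd_10_helper := by
  intro nums s1 s2 _
  exact pv_main nums s1 s2
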